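-- pv_equiv track=rewrite | github.com/inducer/compyte | array.py | f_contiguous_strides
-- ===== SOURCE A (Python) =====
-- def f_contiguous_strides(itemsize, shape):
--     if shape:
--         strides = [itemsize]
--         for s in shape[:-1]:
--             # NOTE: max(1, s) is used to handle 0-sized axes in `shape`;
--             # the stride for `shape[i] <= 1` doesn't matter, but letting it be 0
--             # is not a good idea: https://github.com/inducer/arraycontext/pull/91
--             strides.append(strides[-1]*max(1, s))
--         return tuple(strides)
--     else:
--         return ()
-- ===== SOURCE B (Python) =====
-- def f_contiguous_strides(itemsize, shape):
--     if not shape: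
--         return ()
--     out = []
--     for i in range(len(shape)):
--         p = 1
--         for s in shape[:i]:
--             p *= max(1, s)
--         out.append(itemsize * p)
--     return tuple(out)
-- ===== Notes on version B (the rewrite author's own statement) =====
-- stated objective: alternative
-- what changed: Each stride is computed independently as itemsize times the product of the clamped preceding dimensions (a per-index prefix-product rescan), instead of one forward pass maintaining a running strides list and appending strides[-1]*max(1,s).
import Mathlib
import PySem

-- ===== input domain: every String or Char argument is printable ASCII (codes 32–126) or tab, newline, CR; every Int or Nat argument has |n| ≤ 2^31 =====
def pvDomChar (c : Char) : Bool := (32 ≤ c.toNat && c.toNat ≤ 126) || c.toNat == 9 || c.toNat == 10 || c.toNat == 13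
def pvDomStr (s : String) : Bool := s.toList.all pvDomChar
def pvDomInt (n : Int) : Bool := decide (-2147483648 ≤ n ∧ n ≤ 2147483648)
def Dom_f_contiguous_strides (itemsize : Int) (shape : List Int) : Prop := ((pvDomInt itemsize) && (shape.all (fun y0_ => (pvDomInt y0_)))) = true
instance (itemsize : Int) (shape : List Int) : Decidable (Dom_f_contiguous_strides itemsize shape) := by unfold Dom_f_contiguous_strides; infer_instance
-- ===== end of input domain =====

-- B computes each stride independently as itemsize * product of clamped preceding dims
-- (per-index prefix rescan) instead of A's single running-product pass; objective: alternative.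

-- ===== PORT A =====
-- one forward pass: strides starts as [itemsize], appends strides[-1]*max(1,s) for s in shape[:-1].
-- strides[-1]: the list is never empty, so getLastD 0 is exact here.
def f_contiguous_strides (itemsize : Int) (shape : List Int) : List Int :=
  if shape ≠ [] then
    (PySem.List.slice shape none (some (-1))).foldl
      (fun strides s => strides ++ [strides.getLastD 0 * max 1 s]) [itemsize]
  else []

-- ===== PORT B =====
-- for each i in range(len(shape)): inner loop multiplies max(1,s) over shape[:i] (take i), append itemsize*p.
def f_contiguous_strides_alt (itemsize : Int) (shape : List Int) : List Int :=
  if shape = [] then []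
  else (List.range shape.length).foldl
    (fun out i => out ++ [itemsize * ((shape.take i).foldl (fun p s => p * max 1 s) 1)]) []

-- ===== PRECONDITION & SPEC =====
def Spec_f_contiguous_strides (itemsize : Int) (shape : List Int) (out : List Int) : Prop := out = f_contiguous_strides_alt itemsize shape
instance (itemsize : Int) (shape : List Int) (out : List Int) : Decidable (Spec_f_contiguous_strides itemsize shape out) := by unfold Spec_f_contiguous_strides; infer_instance

-- ===== CLAIM (what is proved, stated in full; the proofs are below) =====
def Claim_equal_f_contiguous_strides : Prop := ∀ (itemsize : Int) (shape : List Int), Dom_f_contiguous_strides itemsize shape → Spec_f_contiguous_strides itemsize shape (f_contiguous_strides itemsize shape)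

-- ===== LEMMAS AND PROOFS =====

-- the sequence of appended strides in A's loop, starting from last stride a
def pvG : List Int → Int → List Int
  | [], _ => []
  | s :: t, a => (a * max 1 s) :: pvG t (a * max 1 s)

theorem pv_loopA (l : List Int) (pre : List Int) (a : Int) :
    l.foldl (fun strides s => strides ++ [strides.getLastD 0 * max 1 s]) (pre ++ [a])
      = pre ++ a :: pvG l a := by
  induction l generalizing pre a with
  | nil => simp [pvG]
  | cons s t ih =>
    simp only [List.foldl_cons, List.getLastD_concat]
    have := ih (pre ++ [a]) (a * max 1 s)
    simpa [pvG] using this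

theorem pv_foldl_mul (l : List Int) (a : Int) :
    l.foldl (fun p s => p * max 1 s) a = a * l.foldl (fun p s => p * max 1 s) 1 := by
  induction l generalizing a with
  | nil => simp
  | cons s t ih =>
    simp only [List.foldl_cons]
    rw [ih (a * max 1 s), ih (1 * max 1 s)]
    ring

theorem pv_loopB (h : Nat → Int) (l : List Nat) (acc : List Int) :
    l.foldl (fun out i => out ++ [h i]) acc = acc ++ l.map h := by
  induction l generalizing acc with
  | nil => simp
  | cons i t ih => simp [ih]

theorem pv_bridge (l : List Int) (a : Int) :
    a :: pvG l a
      = (List.range (l.length + 1)).map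
          (fun i => a * (l.take i).foldl (fun p s => p * max 1 s) 1) := by
  induction l generalizing a with
  | nil => simp [pvG]
  | cons s t ih =>
    rw [List.range_succ_eq_map]
    simp only [List.map_cons, List.map_map, List.length_cons, pvG, List.take_zero,
      List.foldl_nil, mul_one]
    congr 1
    rw [ih (a * max 1 s)]
    apply List.map_congr_left
    intro i _
    simp only [Function.comp_apply, List.take_succ_cons, List.foldl_cons]
    rw [pv_foldl_mul (t.take i) (1 * max 1 s)]
    ring

-- ===== VERDICT (by name: the statement is the Claim_ definition above) =====
theorem f_contiguous_strides_spec : Claim_equal_f_contiguous_strides := by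
  intro itemsize shape _
  unfold Spec_f_contiguous_strides f_contiguous_strides f_contiguous_strides_alt
  by_cases hsh : shape = []
  · simp [hsh]
  · simp only [hsh, if_false, ne_eq, not_false_eq_true, if_true]
    rw [PySem.List.slice_to_neg_one]
    have hA := pv_loopA shape.dropLast [] itemsize
    simp only [List.nil_append] at hA
    rw [hA, pv_bridge, pv_loopB]
    have hlen : shape.dropLast.length + 1 = shape.length := by
      have := List.length_pos_of_ne_nil hsh
      simp [List.length_dropLast]; omega
    rw [hlen, List.nil_append]
    apply List.map_congr_left
    intro i hi
    have hi' : i < shape.length := List.mem_range.mp hi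
    congr 1
    rw [List.dropLast_eq_take, List.take_take,
      min_eq_left (show i ≤ shape.length - 1 by omega)]
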